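-- pv_equiv track=rewrite | github.com/yungangwu/RL | wuziqi/test/debug.py | count_consecutive_elements
-- ===== SOURCE A (Python) =====
-- def count_consecutive_elements(subarray, player):
--     consecutive_count = 0
--     max_consecutive_count = 0
--
--     for element in subarray:
--         if element == player:
--             consecutive_count += 1
--             max_consecutive_count = max(max_consecutive_count, consecutive_count)
--         else:
--             consecutive_count = 0
--
--     return max_consecutive_count
-- ===== SOURCE B (Python) =====
-- def count_consecutive_elements(subarray, player):
--     best = 0
--     i = 0
--     n = len(subarray)
--     while i < n:
--         j = i + 1
--         while j < n and subarray[j] == subarray[i]: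
--             j += 1
--         if subarray[i] == player:
--             best = max(best, j - i)
--         i = j
--     return best
-- ===== Notes on version B (the rewrite author's own statement) =====
-- stated objective: alternative
-- what changed: B decomposes the list into maximal runs of equal elements (an outer loop over run starts with an inner scan to the run end) and takes the max length over runs of player, instead of A's single pass maintaining a running counter with a reset branch.
import Mathlib
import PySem

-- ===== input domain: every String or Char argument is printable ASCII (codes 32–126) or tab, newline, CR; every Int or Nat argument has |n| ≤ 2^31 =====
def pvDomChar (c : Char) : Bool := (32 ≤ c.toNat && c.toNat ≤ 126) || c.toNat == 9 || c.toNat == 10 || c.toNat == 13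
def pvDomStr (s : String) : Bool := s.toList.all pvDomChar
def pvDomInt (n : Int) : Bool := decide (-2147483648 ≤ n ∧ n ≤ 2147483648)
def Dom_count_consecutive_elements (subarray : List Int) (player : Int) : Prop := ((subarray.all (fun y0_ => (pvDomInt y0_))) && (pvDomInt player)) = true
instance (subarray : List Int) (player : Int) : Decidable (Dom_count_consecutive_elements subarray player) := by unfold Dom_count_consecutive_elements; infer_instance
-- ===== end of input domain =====

-- B replaces A's running-counter-with-reset pass by a decomposition into maximal runs of
-- equal elements, taking the max length over the runs equal to player (alternative, same cost).


-- ===== PORT A =====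
-- A: one pass keeping (consecutive_count, max_consecutive_count), reset on mismatch.
def count_consecutive_elements (subarray : List Int) (player : Int) : Int :=
  (subarray.foldl
    (fun (s : Int × Int) element =>
      if element == player then (s.1 + 1, max s.2 (s.1 + 1)) else (0, s.2))
    (0, 0)).2

-- ===== PORT B =====
-- B: scan run by run — at each run start x, the inner scan (takeWhile over the tail,
-- mirroring Source B's inner while comparing subarray[j] to subarray[i]) finds the run end;
-- recurse on the remainder (dropWhile).
def count_consecutive_elements_alt (subarray : List Int) (player : Int) : Int :=
  match subarray with
  | [] => 0
  | x :: xs =>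
      let run := xs.takeWhile (· == x)
      let rest := xs.dropWhile (· == x)
      if x == player then
        max (1 + (run.length : Int)) (count_consecutive_elements_alt rest player)
      else
        count_consecutive_elements_alt rest player
termination_by subarray.length
decreasing_by
  all_goals
    simp only [List.length_cons]
    exact Nat.lt_succ_of_le (xs.length_dropWhile_le _)

-- ===== PRECONDITION & SPEC =====
def Spec_count_consecutive_elements (subarray : List Int) (player : Int) (out : Int) : Prop := out = count_consecutive_elements_alt subarray player
instance (subarray : List Int) (player : Int) (out : Int) : Decidable (Spec_count_consecutive_elements subarray player out) := by unfold Spec_count_consecutive_elements; infer_instance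

-- ===== CLAIM (what is proved, stated in full; the proofs are below) =====
def Claim_equal_count_consecutive_elements : Prop := ∀ (subarray : List Int) (player : Int), Dom_count_consecutive_elements subarray player → Spec_count_consecutive_elements subarray player (count_consecutive_elements subarray player)

-- ===== LEMMAS AND PROOFS =====

-- h player c l = best consecutive count reachable in l given a carry of c matching elements.
def pvBest (player : Int) (c : Int) : List Int → Int
  | [] => 0
  | x :: xs => if x == player then max (c + 1) (pvBest player (c + 1) xs) else pvBest player 0 xs

theorem pvBest_nonneg (player : Int) : ∀ (l : List Int) (c : Int), 0 ≤ c → 0 ≤ pvBest player c l := by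
  intro l
  induction l with
  | nil => intro c hc; simp [pvBest]
  | cons x xs ih =>
      intro c hc
      by_cases h : x == player
      · have := ih (c + 1) (by omega)
        simp [pvBest, h]; omega
      · simpa [pvBest, h] using ih 0 le_rfl

-- the fold of A from state (c, m) yields max m (pvBest player c l)
theorem pvFold_eq (player : Int) : ∀ (l : List Int) (c m : Int), 0 ≤ c → 0 ≤ m →
    (l.foldl (fun (s : Int × Int) element =>
      if element == player then (s.1 + 1, max s.2 (s.1 + 1)) else (0, s.2)) (c, m)).2
      = max m (pvBest player c l) := by
  intro l
  induction l with
  | nil => intro c m hc hm; simp [pvBest]; omega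
  | cons x xs ih =>
      intro c m hc hm
      cases hb : (x == player) with
      | true =>
          simp only [List.foldl_cons, hb, pvBest, if_true]
          rw [ih (c + 1) (max m (c + 1)) (by omega) (by omega)]
          omega
      | false =>
          simp only [List.foldl_cons, hb, pvBest, Bool.false_eq_true, if_false]
          rw [ih 0 m le_rfl hm]

theorem pvBest_reset (player : Int) (rest : List Int) (c : Int)
    (h : rest = [] ∨ ∃ y ys, rest = y :: ys ∧ ¬ (y == player)) :
    pvBest player c rest = pvBest player 0 rest := by
  rcases h with h | ⟨y, ys, rfl, hy⟩
  · simp [h, pvBest]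
  · simp [pvBest, hy]

-- a nonempty all-matching run followed by a reset point
theorem pvBest_run (player : Int) : ∀ (run : List Int) (rest : List Int) (c : Int),
    (∀ x ∈ run, x == player) →
    (rest = [] ∨ ∃ y ys, rest = y :: ys ∧ ¬ (y == player)) →
    run ≠ [] →
    pvBest player c (run ++ rest) = max (c + run.length) (pvBest player 0 rest) := by
  intro run
  induction run with
  | nil => intro rest c _ _ hne; exact absurd rfl hne
  | cons a run' ih =>
      intro rest c hall hrest _
      have ha : a == player := hall a (by simp)
      cases run' with
      | nil =>
          simp only [List.cons_append, List.nil_append, pvBest, ha, if_pos, List.length_cons,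
            List.length_nil]
          rw [pvBest_reset player rest (c + 1) hrest]
          omega
      | cons b run'' =>
          have hIH := ih rest (c + 1) (fun x hx => hall x (by simp [hx])) hrest (by simp)
          simp only [List.cons_append, pvBest, ha, if_pos] at *
          rw [hIH]
          simp only [List.length_cons]
          push_cast
          omega

-- an all-nonmatching run contributes nothing
theorem pvBest_skip (player : Int) : ∀ (run : List Int) (rest : List Int),
    (∀ x ∈ run, ¬ (x == player)) →
    pvBest player 0 (run ++ rest) = pvBest player 0 rest := by
  intro run
  induction run with
  | nil => intro rest _; simp
  | cons a run' ih =>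
      intro rest hall
      have ha := hall a (by simp)
      simp only [List.cons_append, pvBest, ha]
      · exact ih rest (fun x hx => hall x (by simp [hx]))

theorem pvRest_shape (x : Int) (xs : List Int) :
    xs.dropWhile (· == x) = [] ∨ ∃ y ys, xs.dropWhile (· == x) = y :: ys ∧ ¬ (y == x) := by
  cases hd : xs.dropWhile (· == x) with
  | nil => exact Or.inl rfl
  | cons y ys =>
      refine Or.inr ⟨y, ys, rfl, ?_⟩
      have := List.head_dropWhile_not (p := (· == x)) (l := xs) (by simp [hd])
      simpa [hd] using this

theorem alt_eq_best (player : Int) : ∀ (l : List Int),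
    count_consecutive_elements_alt l player = max 0 (pvBest player 0 l) := by
  intro l
  induction hn : l.length using Nat.strong_induction_on generalizing l with
  | _ n ih =>
  cases l with
  | nil => simp [count_consecutive_elements_alt, pvBest]
  | cons x xs =>
      have hsplit : xs = xs.takeWhile (· == x) ++ xs.dropWhile (· == x) :=
        (List.takeWhile_append_dropWhile).symm
      have hrestlen : (xs.dropWhile (· == x)).length < n := by
        subst hn
        exact Nat.lt_succ_of_le (xs.length_dropWhile_le _)
      have hrest := ih _ hrestlen (xs.dropWhile (· == x)) rfl
      have hshape := pvRest_shape x xs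
      have htake : ∀ y ∈ xs.takeWhile (· == x), y == x := by
        intro y hy
        have := List.mem_takeWhile_imp hy
        simpa using this
      by_cases hx : x == player
      · have hxp : x = player := by simpa using hx
        subst hxp
        have hrun : pvBest x 0 (x :: xs) = max (0 + (1 + (xs.takeWhile (· == x)).length : Int)) (pvBest x 0 (xs.dropWhile (· == x))) := by
          have := pvBest_run x (x :: xs.takeWhile (· == x)) (xs.dropWhile (· == x)) 0
            (by
              intro y hy
              rcases List.mem_cons.mp hy with rfl | hy'
              · simp
              · exact htake y hy')
            hshape (by simp)
          rw [show (x :: xs : List Int) = (x :: xs.takeWhile (· == x)) ++ xs.dropWhile (· == x) by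
            simp [← hsplit]]
          rw [this]; simp; ring_nf
        have hnn := pvBest_nonneg x (xs.dropWhile (· == x)) 0 le_rfl
        rw [count_consecutive_elements_alt]
        simp only [beq_self_eq_true, if_pos]
        rw [hrest, hrun]
        omega
      · have hrun : pvBest player 0 (x :: xs) = pvBest player 0 (xs.dropWhile (· == x)) := by
          have := pvBest_skip player (x :: xs.takeWhile (· == x)) (xs.dropWhile (· == x))
            (by
              intro y hy
              rcases List.mem_cons.mp hy with rfl | hy'
              · exact hx
              · have hyx : y = x := by simpa using htake y hy'
                simpa [hyx] using hx)
          rw [show (x :: xs : List Int) = (x :: xs.takeWhile (· == x)) ++ xs.dropWhile (· == x) by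
            simp [← hsplit]]
          exact this
        rw [count_consecutive_elements_alt]
        simp only [eq_false_of_ne_true hx, Bool.false_eq_true, if_false]
        rw [hrest, hrun]

-- ===== VERDICT (by name: the statement is the Claim_ definition above) =====
theorem count_consecutive_elements_spec : Claim_equal_count_consecutive_elements := by
  intro subarray player _
  unfold Spec_count_consecutive_elements count_consecutive_elements
  rw [pvFold_eq player subarray 0 0 le_rfl le_rfl, alt_eq_best]
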